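-- pv_equiv track=rewrite | github.com/tkellogg/boredom | collapse_detection.py | _group_contiguous
-- ===== SOURCE A (Python) =====
-- from typing import Any, Dict, Iterable, List, Optional, Sequence, Tuple
--
-- def _group_contiguous(indices: List[int]) -> List[Tuple[int, int]]:
--     if not indices:
--         return []
--     indices.sort()
--     spans: List[Tuple[int, int]] = []
--     s = indices[0]
--     prev = s
--     for idx in indices[1:]:
--         if idx == prev + 1:
--             prev = idx
--             continue
--         spans.append((s, prev))
--         s = prev = idx
--     spans.append((s, prev))
--     return spans
-- ===== SOURCE B (Python) =====
-- from typing import List, Tuple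
--
-- def _group_contiguous(indices: List[int]) -> List[Tuple[int, int]]:
--     if not indices:
--         return []
--     indices.sort()
--     n = len(indices)
--     # staged passes: pass 1 marks every position where contiguity breaks,
--     # pass 2 turns each pair of adjacent boundaries into a span by indexing.
--     bounds = [0] + [i for i in range(1, n) if indices[i] != indices[i - 1] + 1] + [n]
--     return [(indices[a], indices[b - 1]) for a, b in zip(bounds, bounds[1:])]
-- ===== Notes on version B (the rewrite author's own statement) =====
-- stated objective: alternative
-- what changed: Replaces A's single stateful scan carrying (start, prev, spans) with two staged passes: first compute the list of break positions i where indices[i] != indices[i-1]+1, then build the spans by zipping adjacent boundaries and indexing into the sorted list; both sort in place, the claim is about the return value.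
import Mathlib
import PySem

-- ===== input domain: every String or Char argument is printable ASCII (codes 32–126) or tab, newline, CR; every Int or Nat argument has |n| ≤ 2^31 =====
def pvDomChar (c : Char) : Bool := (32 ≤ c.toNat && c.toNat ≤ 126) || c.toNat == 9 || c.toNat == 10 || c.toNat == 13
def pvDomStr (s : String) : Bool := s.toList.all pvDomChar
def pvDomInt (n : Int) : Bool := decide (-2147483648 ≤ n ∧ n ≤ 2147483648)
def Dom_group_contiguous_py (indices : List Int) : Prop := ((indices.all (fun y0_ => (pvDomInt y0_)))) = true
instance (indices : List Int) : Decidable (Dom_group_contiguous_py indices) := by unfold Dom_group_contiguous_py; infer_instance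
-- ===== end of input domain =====

-- B replaces A's single stateful scan (carrying start/prev/spans) with two staged passes:
-- first the list of break positions, then spans built by zipping adjacent boundaries;
-- both Pythons sort `indices` in place (same mutation); the claim is about the return value.
-- ===== PORT A =====
def group_contiguous_py (indices : List Int) : List (Int × Int) :=
  if indices = [] then []
  else
    let srt := PySem.List.sorted indices (fun x => x)
    let s0 := srt.headD 0              -- indices[0]; srt is nonempty under the guard
    let st := (srt.drop 1).foldl       -- for idx in indices[1:]
      (fun (st : List (Int × Int) × Int × Int) idx =>
        let (spans, s, prev) := st
        if idx = prev + 1 then (spans, s, idx)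
        else (spans ++ [(s, prev)], idx, idx)) ([], s0, s0)
    st.1 ++ [(st.2.1, st.2.2)]

-- ===== PORT B =====
-- indexing is ported with pyGetD: every index B forms is in range (0 ≤ a < b ≤ n on the bounds)
def group_contiguous_py_alt (indices : List Int) : List (Int × Int) :=
  if indices = [] then []
  else
    let srt := PySem.List.sorted indices (fun x => x)
    let n : Int := (srt.length : Int)
    let bounds : List Int :=
      [0] ++ (PySem.List.pyRange 1 n 1).filter
          (fun i => !(PySem.List.pyGetD srt i 0 == PySem.List.pyGetD srt (i - 1) 0 + 1))
        ++ [n]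
    (bounds.zip (bounds.drop 1)).map
      (fun p => (PySem.List.pyGetD srt p.1 0, PySem.List.pyGetD srt (p.2 - 1) 0))

-- ===== PRECONDITION & SPEC =====
def Spec_group_contiguous_py (indices : List Int) (out : List (Int × Int)) : Prop := out = group_contiguous_py_alt indices
instance (indices : List Int) (out : List (Int × Int)) : Decidable (Spec_group_contiguous_py indices out) := by unfold Spec_group_contiguous_py; infer_instance

-- ===== CLAIM (what is proved, stated in full; the proofs are below) =====
def Claim_equal_group_contiguous_py : Prop := ∀ (indices : List Int), Dom_group_contiguous_py indices → Spec_group_contiguous_py indices (group_contiguous_py indices)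

-- ===== LEMMAS AND PROOFS =====

-- contiguous-run splitting: the common characterisation of both ports' results
def pvRuns (s prev : Int) : List Int → List (Int × Int)
  | [] => [(s, prev)]
  | idx :: rest =>
    if idx = prev + 1 then pvRuns s idx rest
    else (s, prev) :: pvRuns idx idx rest

-- the break positions from index m on (B's first pass, as a function of the lower end)
def pvCuts (ys : List Int) (m : Int) : List Int :=
  (PySem.List.pyRange m (ys.length : Int) 1).filter
    (fun i => !(PySem.List.pyGetD ys i 0 == PySem.List.pyGetD ys (i - 1) 0 + 1))

theorem foldA_runs : ∀ (l : List Int) (acc : List (Int × Int)) (s prev : Int),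
    (l.foldl (fun (st : List (Int × Int) × Int × Int) idx =>
        let (spans, s, prev) := st
        if idx = prev + 1 then (spans, s, idx)
        else (spans ++ [(s, prev)], idx, idx)) (acc, s, prev)).1
      ++ [((l.foldl (fun (st : List (Int × Int) × Int × Int) idx =>
        let (spans, s, prev) := st
        if idx = prev + 1 then (spans, s, idx)
        else (spans ++ [(s, prev)], idx, idx)) (acc, s, prev)).2.1,
          (l.foldl (fun (st : List (Int × Int) × Int × Int) idx =>
        let (spans, s, prev) := st
        if idx = prev + 1 then (spans, s, idx)
        else (spans ++ [(s, prev)], idx, idx)) (acc, s, prev)).2.2)]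
    = acc ++ pvRuns s prev l := by
  intro l
  induction l with
  | nil => intro acc s prev; simp [pvRuns]
  | cons idx rest ih =>
    intro acc s prev
    simp only [List.foldl_cons, pvRuns]
    split_ifs with h
    · exact ih acc s idx
    · rw [ih (acc ++ [(s, prev)]) idx idx]
      simp

-- B's staged passes compute the same runs, by downward induction on the lower end m
theorem pairsB_runs : ∀ (k : Nat) (ys : List Int) (m a : Int),
    0 ≤ a → a < m → m ≤ (ys.length : Int) → (ys.length : Int) - m = (k : Int) →
    (((a :: pvCuts ys m ++ [(ys.length : Int)]).zip
        ((a :: pvCuts ys m ++ [(ys.length : Int)]).drop 1)).map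
      (fun p => (PySem.List.pyGetD ys p.1 0, PySem.List.pyGetD ys (p.2 - 1) 0)))
    = pvRuns (PySem.List.pyGetD ys a 0) (PySem.List.pyGetD ys (m - 1) 0) (ys.drop m.toNat) := by
  intro k
  induction k with
  | zero =>
    intro ys m a ha ham hm hk
    have hmn : m = (ys.length : Int) := by omega
    have hc : pvCuts ys m = [] := by
      unfold pvCuts
      rw [PySem.List.pyRange_one_eq_nil (by omega)]
      rfl
    have hd : ys.drop m.toNat = [] := by
      apply List.drop_eq_nil_of_le; omega
    rw [hc, hd]
    simp [pvRuns, hmn]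
  | succ k ih =>
    intro ys m a ha ham hm hk
    have hmn : m < (ys.length : Int) := by omega
    have hmnat : m.toNat < ys.length := by omega
    have hdrop : ys.drop m.toNat = ys[m.toNat] :: ys.drop (m.toNat + 1) :=
      List.drop_eq_getElem_cons hmnat
    have hgm : PySem.List.pyGetD ys m 0 = ys[m.toNat] := by
      exact PySem.List.pyGetD_eq_getElem ys 0 (by omega) (by omega)
    have hm1 : (m + 1).toNat = m.toNat + 1 := by omega
    have hmm : m + 1 - 1 = m := by ring
    by_cases hbr : ys[m.toNat] = PySem.List.pyGetD ys (m - 1) 0 + 1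
    · -- no break at m: current run continues
      have hcuts : pvCuts ys m = pvCuts ys (m + 1) := by
        unfold pvCuts
        rw [PySem.List.pyRange_one_cons hmn]
        simp [hgm, hbr]
      rw [hcuts]
      have hih := ih ys (m + 1) a ha (by omega) (by omega) (by omega)
      rw [hih, hdrop, hmm, hm1, pvRuns, if_pos hbr, hgm]
    · -- break at m: span closes, a new run starts at m
      have hcuts : pvCuts ys m = m :: pvCuts ys (m + 1) := by
        unfold pvCuts
        rw [PySem.List.pyRange_one_cons hmn]
        simp [hgm, hbr]
      rw [hcuts]
      simp only [List.cons_append, List.drop_succ_cons, List.drop_zero,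
        List.zip_cons_cons, List.map_cons]
      have hih := ih ys (m + 1) m (by omega) (by omega) (by omega) (by omega)
      simp only [List.cons_append, List.drop_succ_cons, List.drop_zero] at hih
      rw [hih, hdrop, hmm, hm1, pvRuns, if_neg hbr, hgm]

-- ===== VERDICT (by name: the statement is the Claim_ definition above) =====
theorem group_contiguous_py_spec : Claim_equal_group_contiguous_py := by
  intro indices _
  unfold Spec_group_contiguous_py group_contiguous_py group_contiguous_py_alt
  by_cases hnil : indices = []
  · simp [hnil]
  · simp only [if_neg hnil]
    have hs : PySem.List.sorted indices (fun x => x) ≠ [] := by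
      simpa [PySem.List.sorted_eq_nil_iff] using hnil
    obtain ⟨s0, rest, heq⟩ : ∃ s0 rest, PySem.List.sorted indices (fun x => x) = s0 :: rest := by
      cases h : PySem.List.sorted indices (fun x => x) with
      | nil => exact absurd h hs
      | cons a t => exact ⟨a, t, rfl⟩
    rw [heq]
    set ys := s0 :: rest with hys
    have hlen : 1 ≤ (ys.length : Int) := by simp [hys]
    have hA := foldA_runs (ys.drop 1) [] (ys.headD 0) (ys.headD 0)
    have hB := pairsB_runs ((ys.length : Int) - 1).toNat ys 1 0 (by omega) (by omega) hlen
      (by omega)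
    simp only [List.nil_append] at hA
    rw [hA]
    have hcuts_eq : (PySem.List.pyRange 1 (ys.length : Int) 1).filter
        (fun i => !(PySem.List.pyGetD ys i 0 == PySem.List.pyGetD ys (i - 1) 0 + 1)) = pvCuts ys 1 := rfl
    rw [hcuts_eq]
    simp only [List.singleton_append] at hB ⊢
    rw [hB]
    have hg0 : PySem.List.pyGetD ys 0 0 = s0 := by simp [hys, PySem.List.pyGetD_zero_cons]
    have h11 : (1 : Int) - 1 = 0 := by ring
    rw [h11, hg0]
    simp [hys]
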